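-- pv_equiv track=rewrite | github.com/kiwoook/codingtest | 백준/CLASS4/1918_후위_표기식.py | priority1
-- ===== SOURCE A (Python) =====
-- def priority1(arr):
--     i = 1
--     while '*' in arr or '/' in arr:
--         if arr[i] == '*' or arr[i] == '/':
--             temp = '(' + arr[i - 1] + arr[i] + arr[i + 1] + ')'
--             arr[i - 1:i + 2] = [temp]
--             i = 0
--         i += 1
--     return arr
-- ===== SOURCE B (Python) =====
-- def priority1(arr):
--     # Single left-to-right pass: each '*'/'/' is merged immediately with the
--     # last built token and the next input token (A mutates arr in place and
--     # returns it; B returns a fresh list -- equivalence is about return value).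
--     out = []
--     j = 0
--     n = len(arr)
--     while j < n:
--         t = arr[j]
--         if t == '*' or t == '/':
--             prev = out.pop()
--             out.append('(' + prev + t + arr[j + 1] + ')')
--             j += 2
--         else:
--             out.append(t)
--             j += 1
--     return out
-- ===== Notes on version B (the rewrite author's own statement) =====
-- stated objective: alternative
-- what changed: A repeatedly rescans the list from the front (membership test, restart at i=1 after every merge, slice splice); B builds the result in one left-to-right pass, merging each '*'/'/' with the last output token and the next input token on the fly.
-- outside the precondition, e.g. on priority1(['*', '*', 'b']): A returns ['(**b)'], B raises IndexError; on priority1(['a', '*', '*']): A returns ['(a**)'], B returns ['(a**)']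
import Mathlib
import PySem

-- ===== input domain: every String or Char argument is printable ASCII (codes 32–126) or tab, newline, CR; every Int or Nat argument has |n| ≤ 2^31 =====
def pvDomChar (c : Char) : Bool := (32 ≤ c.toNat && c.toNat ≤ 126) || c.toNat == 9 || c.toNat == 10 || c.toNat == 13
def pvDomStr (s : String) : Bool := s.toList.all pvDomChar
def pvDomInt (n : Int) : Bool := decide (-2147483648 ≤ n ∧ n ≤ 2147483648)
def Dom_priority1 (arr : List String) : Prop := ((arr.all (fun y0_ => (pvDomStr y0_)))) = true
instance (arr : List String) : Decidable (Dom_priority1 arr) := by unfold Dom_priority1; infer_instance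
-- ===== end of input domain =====

-- B replaces A's repeated rescan-from-the-front merging with a single
-- left-to-right pass that merges each '*'/'/' with its neighbours on the fly
-- (a different algorithm; no speed claim is made); A mutates arr in place and
-- returns it, B builds a fresh list, so equivalence is about the return value
-- only.


-- ===== PORT A =====
-- A's while loop over the state (arr, i): scan from i looking for '*'/'/',
-- splice the parenthesised merge in place, restart the scan at i = 1.  The
-- loop is counted down by an explicit fuel (a pure totality guard: each
-- iteration takes one unit, and priority1 passes more fuel than the loop can
-- ever use, so the 0-fuel branch is never reached on any input).  Where
-- Python raises IndexError (arr[i] or arr[i+1] out of range) the port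
-- returns arr; those inputs are outside Pre_priority1.
def aLoop : Nat → List String → Nat → List String
  | 0, arr, _ => arr  -- unreachable: fuel exceeds the possible iteration count
  | fuel + 1, arr, i =>
    if "*" ∈ arr ∨ "/" ∈ arr then
      match arr[i]? with
      | none => arr  -- Python: IndexError (outside Pre_)
      | some t =>
        if t = "*" ∨ t = "/" then
          match arr[i+1]? with
          | some nx =>
            match arr[i-1]? with
            | some p =>
              aLoop fuel (arr.take (i-1) ++ ["(" ++ p ++ t ++ nx ++ ")"] ++ arr.drop (i+2)) 1
            | none => arr  -- unreachable in Python runs (i ≥ 1 always)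
          | none => arr  -- Python: IndexError on arr[i+1] (outside Pre_)
        else aLoop fuel arr (i+1)
      else arr

def priority1 (arr : List String) : List String :=
  aLoop ((arr.length + 2) * (arr.length + 2)) arr 1

-- ===== PORT B =====
-- Source B's single pass; `out` is the Python output list kept in reverse
-- (head = last appended token, so `out.pop()` is the head), `rest` the still
-- unread suffix of arr (j += 2 drops the operator and its right operand).
def bLoop (out : List String) (rest : List String) : List String :=
  match rest with
  | [] => out
  | t :: rest' =>
    if t = "*" ∨ t = "/" then
      match out, rest' with
      | p :: outT, nx :: rest'' => bLoop (("(" ++ p ++ t ++ nx ++ ")") :: outT) rest''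
      | _, _ => out  -- Python: IndexError on out.pop() or arr[j+1] (outside Pre_)
    else bLoop (t :: out) rest'

def priority1_alt (arr : List String) : List String := (bLoop [] arr).reverse

-- ===== PRECONDITION & SPEC =====
-- Pre_ excludes lists whose first or last element is '*' or '/': on such
-- inputs A usually raises IndexError, and on the remainder (a bare operator
-- token adjacent to another operator) A accidentally merges an operator as an
-- operand — there B either raises or happens to agree, so the corner is
-- excluded wholesale.
def Pre_priority1 (arr : List String) : Prop :=
  arr.head? ≠ some "*" ∧ arr.head? ≠ some "/" ∧
  arr.getLast? ≠ some "*" ∧ arr.getLast? ≠ some "/"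
instance (arr : List String) : Decidable (Pre_priority1 arr) := by
  unfold Pre_priority1; infer_instance

def pvWitness_priority1 : List String := ["3", "*", "5", "/", "2"]

def Spec_priority1 (arr : List String) (out : List String) : Prop := out = priority1_alt arr
instance (arr : List String) (out : List String) : Decidable (Spec_priority1 arr out) := by
  unfold Spec_priority1; infer_instance

-- ===== CLAIM (what is proved, stated in full; the proofs are below) =====
def Claim_equal_priority1 : Prop :=
  ∀ (arr : List String), Dom_priority1 arr → Pre_priority1 arr →
    Spec_priority1 arr (priority1 arr)

-- ===== LEMMAS AND PROOFS =====

-- no element of l is an operator token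
def PvNoOp (l : List String) : Prop := "*" ∉ l ∧ "/" ∉ l

-- fuel that A's loop cannot exhaust from the state (arr, i)
def PvPhi (arr : List String) (i : Nat) : Nat := (arr.length + 2) * (arr.length + 2) - i

-- PvPhi facts, proved once so the main proof can treat PvPhi as an atom
theorem pvPhiGe (arr : List String) (i : Nat) (hi : i ≤ arr.length) :
    arr.length - i + 1 ≤ PvPhi arr i := by
  have hX : arr.length + 1 ≤ (arr.length + 2) * (arr.length + 2) := by nlinarith
  unfold PvPhi
  set X := (arr.length + 2) * (arr.length + 2) with hXdef
  omega

theorem pvPhiStep (arr : List String) (i j : Nat) (hij : i ≤ j)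
    (hj : j ≤ arr.length + 1) : PvPhi arr j + (j - i) ≤ PvPhi arr i := by
  have hX : arr.length + 1 ≤ (arr.length + 2) * (arr.length + 2) := by nlinarith
  unfold PvPhi
  set X := (arr.length + 2) * (arr.length + 2) with hXdef
  omega

theorem pvPhiMerge (arr brr : List String) (i : Nat)
    (hb : brr.length + 2 = arr.length) (hi : i ≤ arr.length) :
    PvPhi brr 1 + 1 ≤ PvPhi arr i := by
  have hkey : (brr.length + 2) * (brr.length + 2) + arr.length + 1
      ≤ (arr.length + 2) * (arr.length + 2) := by nlinarith
  unfold PvPhi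
  set X := (arr.length + 2) * (arr.length + 2) with hXdef
  set Y := (brr.length + 2) * (brr.length + 2) with hYdef
  omega

theorem pvMergedNe (p t nx s : String) (hs : s.length = 1) :
    ("(" ++ p ++ t ++ nx ++ ")") ≠ s := by
  intro h
  have hL := congrArg String.length h
  have h1 : "(".length = 1 := rfl
  have h2 : ")".length = 1 := rfl
  simp [String.length_append] at hL
  omega

-- with no operator left, A returns arr whatever the fuel
theorem pvNoOpStop (fuel : Nat) (arr : List String) (i : Nat)
    (hm : ¬("*" ∈ arr ∨ "/" ∈ arr)) : aLoop fuel arr i = arr := by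
  cases fuel with
  | zero => rfl
  | succ fuel => rw [aLoop, if_neg hm]

-- A stops (returning arr) once the scan index is out of range
theorem pvNoneStop (fuel : Nat) (arr : List String) (i : Nat) (h : arr[i]? = none) :
    aLoop fuel arr i = arr := by
  cases fuel with
  | zero => rfl
  | succ fuel =>
    rw [aLoop]
    by_cases hm : "*" ∈ arr ∨ "/" ∈ arr
    · rw [if_pos hm, h]
    · rw [if_neg hm]

-- one scan step of A over a non-operator element
theorem pvSkipOne (fuel : Nat) (arr : List String) (i : Nat) (t : String)
    (h : arr[i]? = some t) (ht : ¬(t = "*" ∨ t = "/")) :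
    aLoop (fuel + 1) arr i = aLoop fuel arr (i + 1) := by
  by_cases hm : "*" ∈ arr ∨ "/" ∈ arr
  · rw [aLoop, if_pos hm, h]
    simp only [if_neg ht]
  · rw [pvNoOpStop _ _ _ hm, pvNoOpStop _ _ _ hm]

-- one merge step of A
theorem pvMergeStep (fuel : Nat) (arr : List String) (i : Nat) (t p nx : String)
    (hm : "*" ∈ arr ∨ "/" ∈ arr) (h : arr[i]? = some t) (ht : t = "*" ∨ t = "/")
    (h1 : arr[i+1]? = some nx) (h2 : arr[i-1]? = some p) :
    aLoop (fuel + 1) arr i =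
      aLoop fuel (arr.take (i-1) ++ ["(" ++ p ++ t ++ nx ++ ")"] ++ arr.drop (i+2)) 1 := by
  rw [aLoop, if_pos hm, h]
  simp only [if_pos ht]
  rw [h1]
  simp only []
  rw [h2]

-- scanning over k consecutive non-operator elements (one fuel unit each)
theorem pvSkip (k : Nat) : ∀ (fuel : Nat) (arr : List String) (i : Nat),
    (∀ j t, i ≤ j → j < i + k → arr[j]? = some t → ¬(t = "*" ∨ t = "/")) →
    aLoop (fuel + k) arr i = aLoop fuel arr (i + k) := by
  induction k with
  | zero => intro fuel arr i _; rfl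
  | succ k ih =>
    intro fuel arr i H
    cases hh : arr[i]? with
    | none =>
      rw [pvNoneStop _ arr i hh, pvNoneStop fuel arr (i + (k+1))]
      exact List.getElem?_eq_none_iff.mpr
        (le_trans (List.getElem?_eq_none_iff.mp hh) (by omega))
    | some t =>
      rw [show fuel + (k + 1) = (fuel + k) + 1 by omega]
      rw [pvSkipOne (fuel + k) arr i t hh (H i t le_rfl (by omega) hh)]
      rw [ih fuel arr (i+1) (fun j t' hj1 hj2 hjt => H j t' (by omega) (by omega) hjt)]
      congr 1
      omega

theorem pvBSkip (out : List String) (t : String) (rest' : List String)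
    (ht : ¬(t = "*" ∨ t = "/")) : bLoop out (t :: rest') = bLoop (t :: out) rest' := by
  rcases out with _ | ⟨p, outT⟩ <;> rcases rest' with _ | ⟨nx, rest''⟩ <;>
    simp only [bLoop, if_neg ht]

theorem pvBMerge (p : String) (outT : List String) (t nx : String) (rest'' : List String)
    (ht : t = "*" ∨ t = "/") :
    bLoop (p :: outT) (t :: nx :: rest'') = bLoop (("(" ++ p ++ t ++ nx ++ ")") :: outT) rest'' := by
  simp only [bLoop, if_pos ht]

-- B's pass over an operator-free suffix just copies it
theorem pvPass (rest : List String) : ∀ (out : List String), PvNoOp rest →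
    bLoop out rest = rest.reverse ++ out := by
  induction rest with
  | nil => intro out _; simp [bLoop]
  | cons t rest' ih =>
    intro out hno
    simp only [PvNoOp, List.mem_cons, not_or] at hno
    rw [pvBSkip out t rest' (by tauto)]
    rw [ih (t :: out) ⟨hno.1.2, hno.2.2⟩]
    simp

-- an operator-free tail means A returns at once and B just copies
theorem pvNoOpCase (fuel : Nat) (rest out : List String) (i : Nat)
    (hm : ¬("*" ∈ out.reverse ++ rest ∨ "/" ∈ out.reverse ++ rest)) :
    aLoop fuel (out.reverse ++ rest) i = (bLoop out rest).reverse := by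
  rw [pvNoOpStop fuel _ i hm]
  rw [not_or] at hm
  rw [pvPass rest out ⟨fun h => hm.1 (List.mem_append.mpr (Or.inr h)),
    fun h => hm.2 (List.mem_append.mpr (Or.inr h))⟩]
  simp

-- getLast? is stable under dropping the head of a list of length ≥ 2
theorem pvLastTail (a : String) (l : List String) (s : String)
    (h : (a :: l).getLast? ≠ some s) (hl : l ≠ []) : l.getLast? ≠ some s := by
  cases l with
  | nil => exact absurd rfl hl
  | cons b l' => rwa [List.getLast?_cons_cons] at h

-- main invariant: A restarted anywhere in the already-built prefix agrees with
-- B, as long as the fuel still exceeds the loop's remaining iteration count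
theorem pvMain (n : Nat) : ∀ (rest out : List String) (i : Nat) (fuel : Nat),
    rest.length ≤ n → PvNoOp out → out ≠ [] →
    rest.getLast? ≠ some "*" → rest.getLast? ≠ some "/" →
    1 ≤ i → i ≤ out.length → PvPhi (out.reverse ++ rest) i ≤ fuel →
    aLoop fuel (out.reverse ++ rest) i = (bLoop out rest).reverse := by
  induction n with
  | zero =>
    intro rest out i fuel hn hno _ _ _ _ _ _
    have hr : rest = [] := List.eq_nil_of_length_eq_zero (Nat.le_zero.mp hn)
    subst hr
    refine pvNoOpCase fuel [] out i ?_
    rintro (h | h) <;> rcases List.mem_append.mp h with h' | h' <;>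
      first
        | exact hno.1 (List.mem_reverse.mp h')
        | exact hno.2 (List.mem_reverse.mp h')
        | cases h'
  | succ n ih =>
    intro rest out i fuel hn hno hne hl1 hl2 hi1 hi2 hfuel
    by_cases hm : "*" ∈ out.reverse ++ rest ∨ "/" ∈ out.reverse ++ rest
    · cases rest with
      | nil =>
        exfalso
        rcases hm with h | h <;> rcases List.mem_append.mp h with h' | h' <;>
          first
            | exact hno.1 (List.mem_reverse.mp h')
            | exact hno.2 (List.mem_reverse.mp h')
            | cases h'
      | cons t rest' =>
        -- split the fuel: one unit per skipped prefix element, one for the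
        -- step at position out.length, the rest for the recursive call
        have hilen : i ≤ (out.reverse ++ t :: rest').length := by simp; try omega
        have hfuel2 : out.length - i + 1 ≤ fuel := by
          have h1 := pvPhiGe (out.reverse ++ t :: rest') i hilen
          have h2 : out.length ≤ (out.reverse ++ t :: rest').length := by simp; try omega
          omega
        obtain ⟨f, hf⟩ : ∃ f, fuel = (f + 1) + (out.length - i) :=
          ⟨fuel - (out.length - i) - 1, by omega⟩
        have hstep := pvPhiStep (out.reverse ++ t :: rest') i (out.length + 1)
          (by omega) (by simp; try omega)
        have hskip : aLoop fuel (out.reverse ++ t :: rest') i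
            = aLoop (f + 1) (out.reverse ++ t :: rest') out.length := by
          have H : ∀ j tj, i ≤ j → j < i + (out.length - i) →
              (out.reverse ++ t :: rest')[j]? = some tj → ¬(tj = "*" ∨ tj = "/") := by
            intro j tj _ hj2 hjget
            have hjlt : j < out.reverse.length := by simp; try omega
            rw [List.getElem?_append_left hjlt] at hjget
            have htj : tj ∈ out := List.mem_reverse.mp (List.mem_of_getElem? hjget)
            rintro (rfl | rfl)
            · exact hno.1 htj
            · exact hno.2 htj
          have h2 := pvSkip (out.length - i) (f + 1) (out.reverse ++ t :: rest') i H
          rw [hf]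
          rw [h2]
          congr 1
          omega
        rw [hskip]
        have hat : (out.reverse ++ t :: rest')[out.length]? = some t := by
          rw [List.getElem?_append_right (by simp)]
          simp
        by_cases ht : t = "*" ∨ t = "/"
        · cases rest' with
          | nil =>
            exfalso
            rcases ht with rfl | rfl
            · exact hl1 (by simp)
            · exact hl2 (by simp)
          | cons nx rest'' =>
            cases out with
            | nil => exact absurd rfl hne
            | cons p outT =>
              have hnx : ((p :: outT).reverse ++ t :: nx :: rest'')[(p :: outT).length + 1]?
                  = some nx := by
                rw [List.getElem?_append_right (by simp)]
                simp
              have hp : ((p :: outT).reverse ++ t :: nx :: rest'')[(p :: outT).length - 1]?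
                  = some p := by
                rw [List.getElem?_append_left (by simp)]
                simp [List.reverse_cons]
              rw [pvMergeStep f _ (p :: outT).length t p nx hm hat ht hnx hp]
              have htake : ((p :: outT).reverse ++ t :: nx :: rest'').take
                  ((p :: outT).length - 1) = outT.reverse := by
                rw [List.reverse_cons, List.append_assoc]
                exact List.take_left' (by simp)
              have hdrop : ((p :: outT).reverse ++ t :: nx :: rest'').drop
                  ((p :: outT).length + 2) = rest'' := by
                rw [show (p :: outT).reverse ++ t :: nx :: rest''
                    = ((p :: outT).reverse ++ [t, nx]) ++ rest'' by simp]
                exact List.drop_left' (by simp)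
              rw [htake, hdrop]
              rw [show outT.reverse ++ ["(" ++ p ++ t ++ nx ++ ")"] ++ rest''
                  = (("(" ++ p ++ t ++ nx ++ ")") :: outT).reverse ++ rest'' by simp]
              rw [pvBMerge p outT t nx rest'' ht]
              refine ih rest'' (("(" ++ p ++ t ++ nx ++ ")") :: outT) 1 f
                (by simp at hn ⊢; omega) ?_ (by simp) ?_ ?_ le_rfl (by simp) ?_
              · constructor
                · intro h
                  rcases List.mem_cons.mp h with h' | h'
                  · exact pvMergedNe p t nx "*" rfl h'.symm
                  · exact hno.1 (List.mem_cons.mpr (Or.inr h'))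
                · intro h
                  rcases List.mem_cons.mp h with h' | h'
                  · exact pvMergedNe p t nx "/" rfl h'.symm
                  · exact hno.2 (List.mem_cons.mpr (Or.inr h'))
              · cases rest'' with
                | nil => simp
                | cons r rs =>
                  exact pvLastTail nx (r :: rs)
                    "*" (pvLastTail t (nx :: r :: rs) "*" hl1 (by simp)) (by simp)
              · cases rest'' with
                | nil => simp
                | cons r rs =>
                  exact pvLastTail nx (r :: rs)
                    "/" (pvLastTail t (nx :: r :: rs) "/" hl2 (by simp)) (by simp)
              · -- the merge shortens the list by 2, so the old fuel bound
                -- (minus the units already spent) still covers the new state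
                have hb : ((("(" ++ p ++ t ++ nx ++ ")") :: outT).reverse ++ rest'').length + 2
                    = ((p :: outT).reverse ++ t :: nx :: rest'').length := by simp; try omega
                have hmg := pvPhiMerge ((p :: outT).reverse ++ t :: nx :: rest'')
                  ((("(" ++ p ++ t ++ nx ++ ")") :: outT).reverse ++ rest'')
                  ((p :: outT).length) hb (by simp; try omega)
                have hstep2 := pvPhiStep ((p :: outT).reverse ++ t :: nx :: rest'') i
                  ((p :: outT).length) (by omega) (by simp; try omega)
                omega
        · rw [pvSkipOne f _ out.length t hat ht]
          rw [show out.reverse ++ t :: rest' = (t :: out).reverse ++ rest' by simp]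
          rw [pvBSkip out t rest' ht]
          refine ih rest' (t :: out) (out.length + 1) f (by simp at hn ⊢; omega) ?_ (by simp)
            ?_ ?_ (by omega) (by simp) ?_
          · constructor
            · intro h
              rcases List.mem_cons.mp h with h' | h'
              · exact ht (Or.inl h'.symm)
              · exact hno.1 h'
            · intro h
              rcases List.mem_cons.mp h with h' | h'
              · exact ht (Or.inr h'.symm)
              · exact hno.2 h'
          · cases rest' with
            | nil => simp
            | cons r rs => exact pvLastTail t (r :: rs) "*" hl1 (by simp)
          · cases rest' with
            | nil => simp
            | cons r rs => exact pvLastTail t (r :: rs) "/" hl2 (by simp)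
          · have hre : (t :: out).reverse ++ rest' = out.reverse ++ t :: rest' := by simp
            rw [hre]
            omega
    · exact pvNoOpCase fuel rest out i hm

-- ===== VERDICT (by name: the statement is the Claim_ definition above) =====
theorem priority1_spec : Claim_equal_priority1 := by
  intro arr _dom hpre
  unfold Spec_priority1
  obtain ⟨hp1, hp2, hp3, hp4⟩ := hpre
  cases arr with
  | nil =>
    unfold priority1 priority1_alt
    rw [pvNoneStop _ [] 1 rfl]
    rfl
  | cons t rest =>
    simp only [List.head?_cons, ne_eq, Option.some.injEq] at hp1 hp2
    have ht : ¬(t = "*" ∨ t = "/") := by tauto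
    unfold priority1 priority1_alt
    rw [pvBSkip [] t rest ht]
    rw [show (t :: rest) = ([t]).reverse ++ rest by simp]
    refine pvMain rest.length rest [t] 1 _ le_rfl ?_ (by simp) ?_ ?_ le_rfl (by simp) ?_
    · exact ⟨by simpa using fun h => hp1 h.symm, by simpa using fun h => hp2 h.symm⟩
    · cases rest with
      | nil => simp
      | cons r rs => exact pvLastTail t (r :: rs) "*" hp3 (by simp)
    · cases rest with
      | nil => simp
      | cons r rs => exact pvLastTail t (r :: rs) "/" hp4 (by simp)
    · exact Nat.sub_le _ _
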